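-- pv_equiv track=rewrite | github.com/aajing/nexttra | 3.28.py | mod_gauss
-- ===== SOURCE A (Python) =====
-- import copy
--
-- def mod_gauss(a, b, p):
--
--     mat = copy.deepcopy(a)
--     y = copy.deepcopy(b)
--     m, n = len(b), len(a)
--
--     for k in range(0, n-1):
--         for i in range(k+1, n):
--             z = mat[i][k] * pow(mat[k][k], -1, p) % p
--             for l in range(m):
--                 y[l][i] = (y[l][i] - z * y[l][k]) % p
--             mat[i][k] = 0
--             for j in range(k+1, n):
--                 mat[i][j] = (mat[i][j] - z * mat[k][j]) % p
--
--     x = [[0 for _ in range(n)] for _ in range(m)]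
--
--     for l in range(m):
--         for i in range(n-1, -1, -1):
--             s = 0
--             for j in range(i+1, n):
--                 s = (s + mat[i][j] * x[l][j]) % p
--             x[l][i] = (y[l][i] - s) * pow(mat[i][i], -1, p) % p
--
--     return x
-- ===== SOURCE B (Python) =====
-- def mod_gauss(a, b, p):
--     n, m = len(a), len(b)
--
--     # Forward elimination as structural recursion on augmented rows:
--     # row i carries its coefficients for the remaining columns followed by
--     # the i-th entry of every right-hand side; each step consumes the pivot
--     # row and reduces the tail rows, dropping the eliminated column.
--     def solve(rows):
--         if not rows:
--             return []
--         piv, rest = rows[0], rows[1:]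
--         if rest:
--             d_inv = pow(piv[0], -1, p)
--             rest = [[(rj - (r[0] * d_inv % p) * pj) % p
--                      for rj, pj in zip(r[1:], piv[1:])]
--                     for r in rest]
--         return [piv] + solve(rest)
--
--     pivots = solve([list(a[i][:n]) + [b[l][i] for l in range(m)]
--                     for i in range(n)])
--
--     # Back substitution, building each solution vector back to front.
--     def back(rows, l):
--         if not rows:
--             return []
--         piv, rest = rows[0], rows[1:]
--         tail = back(rest, l)
--         s = 0
--         for c, xv in zip(piv[1:], tail):
--             s = (s + c * xv) % p
--         return [(piv[len(piv) - m + l] - s) * pow(piv[0], -1, p) % p] + tail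
--
--     return [back(pivots, l) for l in range(m)]
-- ===== Notes on version B (the rewrite author's own statement) =====
-- stated objective: alternative
-- what changed: Replaces the in-place index-loop Gaussian elimination on separate mat/y arrays by a structural recursion over augmented rows (each row carries its remaining coefficients plus the right-hand-side entries and shrinks as columns are eliminated) and replaces the index-based back-substitution filling a zero matrix by a recursion that builds each solution vector back to front.
import Mathlib
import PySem

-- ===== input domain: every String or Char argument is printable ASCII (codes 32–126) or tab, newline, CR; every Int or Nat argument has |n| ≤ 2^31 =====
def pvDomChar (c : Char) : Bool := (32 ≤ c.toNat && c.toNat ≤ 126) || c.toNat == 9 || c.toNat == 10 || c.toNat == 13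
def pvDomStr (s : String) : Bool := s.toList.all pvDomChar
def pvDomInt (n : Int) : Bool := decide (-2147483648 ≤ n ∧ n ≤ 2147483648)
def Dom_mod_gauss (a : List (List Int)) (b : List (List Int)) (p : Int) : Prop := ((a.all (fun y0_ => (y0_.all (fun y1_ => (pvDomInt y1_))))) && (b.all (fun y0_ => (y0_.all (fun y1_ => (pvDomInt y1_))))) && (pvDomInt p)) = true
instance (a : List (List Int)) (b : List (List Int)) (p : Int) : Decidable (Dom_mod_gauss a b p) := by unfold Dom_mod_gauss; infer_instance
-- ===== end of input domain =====

-- B re-implements the same modular elimination as a structural recursion on augmented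
-- shrinking rows plus a back-to-front recursive back substitution (objective: alternative
-- decomposition, same cost); equal outputs are proved on Pre_mod_gauss.

-- `pow(x, -1, p)` for p ≠ 0: the inverse of x modulo p, normalized with the sign of p
-- (Python's `%`); 0 when x is not invertible (where Python raises; Pre_ excludes that).
def pyPowInv (x p : Int) : Int :=
  if p = 0 then 0
  else if Int.gcd x p = 1 then PySem.Int.mod (Int.gcdA x p) p
  else 0

-- `mss[i][j]` for nested lists, both indices known in range under Pre_.
def ggA (mss : List (List Int)) (i j : Nat) : Int := (mss.getD i []).getD j 0

-- ===== PORT A =====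
-- the body of A's `for i in range(k+1, n)` loop (state = (mat, y))
def bodyA (p : Int) (n m k : Nat) (st : List (List Int) × List (List Int)) (i : Nat) :
    List (List Int) × List (List Int) :=
  let mat := st.1
  let y := st.2
  let z := PySem.Int.mod (ggA mat i k * pyPowInv (ggA mat k k) p) p
  let y2 := (List.range m).foldl
    (fun y l => y.set l ((y.getD l []).set i (PySem.Int.mod (ggA y l i - z * ggA y l k) p))) y
  let mat2 := mat.set i ((mat.getD i []).set k 0)
  let mat3 := (List.range' (k+1) (n-(k+1))).foldl
    (fun mt j => mt.set i ((mt.getD i []).set j (PySem.Int.mod (ggA mt i j - z * ggA mt k j) p))) mat2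
  (mat3, y2)

def mod_gauss (a : List (List Int)) (b : List (List Int)) (p : Int) : List (List Int) :=
  -- mat = deepcopy(a); y = deepcopy(b); m, n = len(b), len(a)
  let m := b.length
  let n := a.length
  -- forward elimination: for k in range(0, n-1): for i in range(k+1, n): …
  let st := (List.range (n-1)).foldl
    (fun st k => (List.range' (k+1) (n-(k+1))).foldl (bodyA p n m k) st) (a, b)
  let mat := st.1
  let y := st.2
  -- x = [[0]*n for _ in range(m)]
  let x0 : List (List Int) := (List.range m).map (fun _ => (List.range n).map (fun _ => (0:Int)))
  -- back substitution: for l in range(m): for i in range(n-1, -1, -1): …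
  (List.range m).foldl
    (fun x l => ((List.range n).reverse).foldl
      (fun x i =>
        let s := (List.range' (i+1) (n-(i+1))).foldl
          (fun s j => PySem.Int.mod (s + ggA mat i j * ggA x l j) p) 0
        x.set l ((x.getD l []).set i
          (PySem.Int.mod ((ggA y l i - s) * pyPowInv (ggA mat i i) p) p))) x) x0

-- ===== PORT B =====
-- forward elimination as structural recursion on augmented rows: consume the pivot row,
-- reduce the tail rows dropping the eliminated column, recurse
def solveB (p : Int) : List (List Int) → List (List Int)
  | [] => []
  | piv :: rest =>
    let rest' := if rest.isEmpty then rest else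
      let dInv := pyPowInv (piv.headD 0) p
      rest.map (fun r =>
        List.zipWith (fun rj pj => PySem.Int.mod (rj - PySem.Int.mod (r.headD 0 * dInv) p * pj) p)
          (r.drop 1) (piv.drop 1))
    piv :: solveB p rest'
  termination_by rows => rows.length
  decreasing_by split <;> simp

-- back substitution for right-hand side l, building the solution vector back to front
def backB (p : Int) (m : Nat) (l : Nat) : List (List Int) → List Int
  | [] => []
  | piv :: rest =>
    let tail := backB p m l rest
    let s := ((piv.drop 1).zip tail).foldl (fun s cx => PySem.Int.mod (s + cx.1 * cx.2) p) 0
    PySem.Int.mod ((piv.getD (piv.length - m + l) 0 - s) * pyPowInv (piv.headD 0) p) p :: tail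

def mod_gauss_alt (a : List (List Int)) (b : List (List Int)) (p : Int) : List (List Int) :=
  let n := a.length
  let m := b.length
  let pivots := solveB p ((List.range n).map
    (fun i => (a.getD i []).take n ++ (List.range m).map (fun l => ggA b l i)))
  (List.range m).map (fun l => backB p m l pivots)

-- ===== PRECONDITION & SPEC =====
-- determinant by Laplace expansion along the first row (used only to state Pre_);
-- structural recursion on the row count so that `decide` can evaluate it
def detRows : Nat → List (List Int) → Int
  | _, [] => 1
  | 0, _ :: _ => 0  -- never reached: the fuel is the number of rows
  | c + 1, r :: rs =>
    (((List.range r.length).map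
      (fun j => (-1:Int)^j * r.getD j 0 * detRows c (rs.map (fun row => row.eraseIdx j)))).sum)

def detL (m : List (List Int)) : Int := detRows m.length m

-- leading s×s principal minor of a
def minorL (a : List (List Int)) (s : Nat) : Int := detL ((a.take s).map (fun r => r.take s))

-- Exactly the inputs where Python's A returns normally: every row long enough (else
-- IndexError), and every pivot that A actually inverts is invertible mod p with p ≠ 0
-- (else pow raises): pivots 0..n-2 are inverted during elimination, and all pivots
-- 0..n-1 during back substitution when b is non-empty; pivot k is invertible iff the
-- (k+1)-st leading principal minor is coprime to p.
def Pre_mod_gauss (a : List (List Int)) (b : List (List Int)) (p : Int) : Prop :=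
  (∀ r ∈ a, a.length ≤ r.length) ∧ (∀ r ∈ b, a.length ≤ r.length) ∧
  (∀ k, k < a.length → k + 1 < a.length → p ≠ 0 ∧ Int.gcd (minorL a (k+1)) p = 1) ∧
  (b ≠ [] → ∀ k, k < a.length → p ≠ 0 ∧ Int.gcd (minorL a (k+1)) p = 1)
instance (a : List (List Int)) (b : List (List Int)) (p : Int) : Decidable (Pre_mod_gauss a b p) := by
  unfold Pre_mod_gauss; infer_instance

def pvWitness_mod_gauss : List (List Int) × List (List Int) × Int :=
  ([[2, 1], [1, 1]], [[3, 4]], 5)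

def Spec_mod_gauss (a : List (List Int)) (b : List (List Int)) (p : Int) (out : List (List Int)) : Prop := out = mod_gauss_alt a b p
instance (a : List (List Int)) (b : List (List Int)) (p : Int) (out : List (List Int)) : Decidable (Spec_mod_gauss a b p out) := by unfold Spec_mod_gauss; infer_instance

-- ===== CLAIM (what is proved, stated in full; the proofs are below) =====
def Claim_equal_mod_gauss : Prop := ∀ (a : List (List Int)) (b : List (List Int)) (p : Int), Dom_mod_gauss a b p → Pre_mod_gauss a b p → Spec_mod_gauss a b p (mod_gauss a b p)

-- ===== LEMMAS AND PROOFS =====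

-- ---- small getD/set toolkit ----
lemma getD_set_self {α} (l : List α) (i : Nat) (x d : α) (h : i < l.length) :
    (l.set i x).getD i d = x := by
  simp [List.getD, h]

lemma getD_set_ne {α} (l : List α) (i j : Nat) (x : α) (d : α) (h : i ≠ j) :
    (l.set i x).getD j d = l.getD j d := by
  simp [List.getD, List.getElem?_set_ne h]

lemma set_getD_self {α} (l : List α) (i : Nat) (d : α) (h : i < l.length) :
    l.set i (l.getD i d) = l := by
  rw [List.getD_eq_getElem l d h]; exact List.set_getElem_self h

-- a foldl whose every step sets the same index l, reading only row l
lemma foldl_set_at {α β} (L : List β) (l : Nat) (H : β → List α → List α) :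
    ∀ (x : List (List α)),
      L.foldl (fun x i => x.set l (H i (x.getD l []))) x
        = x.set l (L.foldl (fun r i => H i r) (x.getD l [])) := by
  induction L with
  | nil =>
    intro x
    simp only [List.foldl_nil]
    by_cases h : l < x.length
    · exact (set_getD_self x l [] h).symm
    · rw [List.set_eq_of_length_le (by omega)]
  | cons i L ih =>
    intro x
    simp only [List.foldl_cons]
    by_cases h : l < x.length
    · rw [ih (x.set l (H i (x.getD l []))),
        getD_set_self x l _ [] h, List.set_set]
    · rw [List.set_eq_of_length_le (le_of_not_gt h), ih,
        List.set_eq_of_length_le (le_of_not_gt h), List.set_eq_of_length_le (le_of_not_gt h)]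

-- the j-fold of A's elimination body: sets row i, reading row i and the fixed row k
lemma foldl_set_row (L : List Nat) (i k : Nat) (hik : i ≠ k) (G : Nat → Int → Int → Int) :
    ∀ (ms : List (List Int)), i < ms.length →
      L.foldl (fun mt j => mt.set i ((mt.getD i []).set j
          (G j ((mt.getD i []).getD j 0) ((mt.getD k []).getD j 0)))) ms
        = ms.set i (L.foldl (fun r j => r.set j (G j (r.getD j 0) (((ms.getD k []).getD j 0)))) (ms.getD i [])) := by
  induction L with
  | nil => intro ms h; simp only [List.foldl_nil]; exact (set_getD_self ms i [] h).symm
  | cons j L ih =>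
    intro ms h
    simp only [List.foldl_cons]
    rw [ih (ms.set i _) (by simpa using h), getD_set_self ms i _ [] h, List.set_set,
      getD_set_ne ms i k _ [] hik]

-- pointwise value of a fold of sets at distinct indices, each reading its own slot
lemma fold_set_range'_getD {α} (f : Nat → α → α) (d : α) :
    ∀ (c s : Nat) (r : List α) (t : Nat),
      (((List.range' s c).foldl (fun r j => r.set j (f j (r.getD j d))) r).getD t d)
        = if s ≤ t ∧ t < s + c ∧ t < r.length then f t (r.getD t d) else r.getD t d := by
  intro c
  induction c with
  | zero => intro s r t; simp; omega
  | succ c ih =>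
    intro s r t
    rw [List.range'_succ, List.foldl_cons, ih (s+1)]
    simp only [List.length_set]
    by_cases hst : t = s
    · subst hst
      rw [if_neg (by omega)]
      by_cases hl : t < r.length
      · rw [getD_set_self r t _ d hl, if_pos ⟨le_refl t, by omega, hl⟩]
      · rw [List.set_eq_of_length_le (by omega), if_neg (by omega)]
    · rw [getD_set_ne r s t _ d fun h => hst h.symm]
      by_cases h1 : s + 1 ≤ t ∧ t < s + 1 + c ∧ t < r.length
      · rw [if_pos h1, if_pos (by omega)]
      · rw [if_neg h1, if_neg (by omega)]

-- a fold of sets at distinct row indices s..s+c-1 (covering the tail) is take ++ map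
lemma fold_set_map {α} (F : Nat → List α → List α) :
    ∀ (c s : Nat) (x : List (List α)), s + c = x.length →
      (List.range' s c).foldl (fun x l => x.set l (F l (x.getD l []))) x
        = x.take s ++ (List.range' s c).map (fun l => F l (x.getD l [])) := by
  intro c
  induction c with
  | zero =>
    intro s x h
    simp only [List.range'_zero, List.foldl_nil, List.map_nil, List.append_nil]
    rw [List.take_of_length_le (by omega)]
  | succ c ih =>
    intro s x h
    have hs : s < x.length := by omega
    rw [List.range'_succ, List.foldl_cons, ih (s+1) _ (by simp; omega)]
    have hx : x.take (s+1) = x.take s ++ [x[s]] := by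
      rw [List.take_add_one, List.getElem?_eq_getElem hs]
      simp
    have hlen : (x.take s).length = s := by
      rw [List.length_take]; omega
    have h2 : ∀ v, (x.set s v).take (s+1) = x.take s ++ [v] := by
      intro v
      apply List.ext_getElem (by simp; omega)
      intro i h1 h2
      simp only [List.getElem_take, List.getElem_set]
      by_cases his : i = s
      · subst his
        rw [if_pos rfl, List.getElem_append_right (by simp [hlen])]
        simp [hlen]
      · have hilt : i < (x.take s).length := by
          rw [hlen]
          have : i ≤ s ∧ i < x.length := by simpa using h1
          omega
        rw [if_neg (fun hh => his hh.symm), List.getElem_append_left hilt]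
        simp
    have h3 : (List.range' (s+1) c).map (fun l => F l ((x.set s (F s (x.getD s []))).getD l []))
        = (List.range' (s+1) c).map (fun l => F l (x.getD l [])) := by
      apply List.map_congr_left
      intro l hl
      obtain ⟨i, hi, rfl⟩ := List.mem_range'.mp hl
      rw [getD_set_ne x s (s + 1 + 1 * i) (F s (x.getD s [])) [] (by omega)]
    rw [h2, h3]
    simp

-- ---- characterization of one iteration of A's elimination body ----

-- z of A's body at pivot k, row i, read off the matrix
def zA (p : Int) (mat : List (List Int)) (k i : Nat) : Int :=
  PySem.Int.mod (ggA mat i k * pyPowInv (ggA mat k k) p) p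

lemma length_foldl_set_row {α} (f : Nat → α → α) (d : α) (L : List Nat) :
    ∀ (r : List α), (L.foldl (fun r j => r.set j (f j (r.getD j d))) r).length = r.length := by
  induction L with
  | nil => intro r; rfl
  | cons j L ih => intro r; rw [List.foldl_cons, ih]; simp

lemma getD_map_range {α} (F : Nat → α) (m l : Nat) (d : α) :
    ((List.range m).map F).getD l d = if l < m then F l else d := by
  by_cases h : l < m
  · rw [List.getD_eq_getElem _ d (by simpa using h), if_pos h]
    simp
  · rw [if_neg h, List.getD_eq_default _ d (by simpa using Nat.le_of_not_lt h)]

lemma bodyA_eq (p : Int) (n m k i : Nat) (mat y : List (List Int))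
    (hik : i ≠ k) (hi : i < mat.length) (hm : m = y.length) :
    bodyA p n m k (mat, y) i =
      (mat.set i ((List.range' (k+1) (n-(k+1))).foldl
          (fun r j => r.set j
            (PySem.Int.mod (r.getD j 0 - zA p mat k i * (mat.getD k []).getD j 0) p))
          ((mat.getD i []).set k 0)),
       (List.range m).map (fun l => (y.getD l []).set i
          (PySem.Int.mod ((y.getD l []).getD i 0 - zA p mat k i * (y.getD l []).getD k 0) p))) := by
  unfold bodyA zA ggA
  dsimp only
  rw [Prod.mk.injEq]
  constructor
  · rw [foldl_set_row (List.range' (k+1) (n-(k+1))) i k hik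
      (fun j v w => PySem.Int.mod (v - PySem.Int.mod ((mat.getD i []).getD k 0 * pyPowInv ((mat.getD k []).getD k 0) p) p * w) p)
      (mat.set i ((mat.getD i []).set k 0)) (by simpa using hi)]
    rw [List.set_set, getD_set_self mat i _ [] hi, getD_set_ne mat i k _ [] hik]
  · have := fold_set_map (fun l r => r.set i
        (PySem.Int.mod (r.getD i 0 - PySem.Int.mod ((mat.getD i []).getD k 0 * pyPowInv ((mat.getD k []).getD k 0) p) p * r.getD k 0) p))
        m 0 y (by omega)
    simpa [List.range_eq_range'] using this

-- shape invariant carried through the elimination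
def SH (n m : Nat) (st : List (List Int) × List (List Int)) : Prop :=
  st.1.length = n ∧ st.2.length = m ∧
  (∀ i, i < n → n ≤ (st.1.getD i []).length) ∧
  (∀ l, l < m → n ≤ (st.2.getD l []).length)

-- full characterization of A's inner loop `for i in range(s, s+c)` at pivot k
lemma ifold (p : Int) (n m k : Nat) :
    ∀ (c s : Nat) (st : List (List Int) × List (List Int)), SH n m st → k < s → s + c ≤ n →
      (SH n m ((List.range' s c).foldl (bodyA p n m k) st)) ∧
      (∀ i, i < s ∨ s + c ≤ i →
        ((List.range' s c).foldl (bodyA p n m k) st).1.getD i [] = st.1.getD i []) ∧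
      (∀ l t, t < s ∨ s + c ≤ t →
        ggA ((List.range' s c).foldl (bodyA p n m k) st).2 l t = ggA st.2 l t) ∧
      (∀ i, s ≤ i → i < s + c →
        (∀ j, j < n →
          ggA ((List.range' s c).foldl (bodyA p n m k) st).1 i j
            = if j = k then 0
              else if k+1 ≤ j then PySem.Int.mod (ggA st.1 i j - zA p st.1 k i * ggA st.1 k j) p
              else ggA st.1 i j) ∧
        (∀ l, l < m →
          ggA ((List.range' s c).foldl (bodyA p n m k) st).2 l i
            = PySem.Int.mod (ggA st.2 l i - zA p st.1 k i * ggA st.2 l k) p)) := by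
  intro c
  induction c with
  | zero =>
    intro s st hSH hks hsc
    refine ⟨by simpa using hSH, by simp, by simp, ?_⟩
    intro i h1 h2
    omega
  | succ c ih =>
    intro s st hSH hks hsc
    obtain ⟨mat, y⟩ := st
    obtain ⟨hL1, hL2, hR1, hR2⟩ := hSH
    simp only at hL1 hL2 hR1 hR2
    have hsn : s < n := by omega
    have hsk : s ≠ k := by omega
    have hsl : s < mat.length := by omega
    have hbody := bodyA_eq p n m k s mat y hsk hsl hL2.symm
    set z := zA p mat k s with hz
    set R := (List.range' (k+1) (n-(k+1))).foldl
        (fun r j => r.set j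
          (PySem.Int.mod (r.getD j 0 - z * (mat.getD k []).getD j 0) p))
        ((mat.getD s []).set k 0) with hR
    set Y := (List.range m).map (fun l => (y.getD l []).set s
        (PySem.Int.mod ((y.getD l []).getD s 0 - z * (y.getD l []).getD k 0) p)) with hY
    have hst1 : bodyA p n m k (mat, y) s = (mat.set s R, Y) := hbody
    -- shape of the intermediate state
    have hRlen : R.length = (mat.getD s []).length := by
      rw [hR, length_foldl_set_row
        (fun j v => PySem.Int.mod (v - z * (mat.getD k []).getD j 0) p) 0]
      simp
    have hYget : ∀ l, Y.getD l [] = if l < m then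
        (y.getD l []).set s
          (PySem.Int.mod ((y.getD l []).getD s 0 - z * (y.getD l []).getD k 0) p) else [] := by
      intro l; rw [hY, getD_map_range]
    have hyempty : ∀ l, m ≤ l → y.getD l [] = [] := by
      intro l hl; exact List.getD_eq_default _ [] (by omega)
    have hSH1 : SH n m (mat.set s R, Y) := by
      refine ⟨by simpa using hL1, by simp [hY], ?_, ?_⟩
      · intro i hi
        by_cases his : i = s
        · subst his
          rw [getD_set_self mat i R [] hsl, hRlen]
          exact hR1 i hi
        · rw [getD_set_ne mat s i R [] (fun h => his h.symm)]
          exact hR1 i hi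
      · intro l hl
        simp only [hYget l, if_pos hl, List.length_set]
        exact hR2 l hl
    have IH := ih (s+1) (mat.set s R, Y) hSH1 (by omega) (by omega)
    obtain ⟨IH1, IH2, IH3, IH4⟩ := IH
    simp only at IH1 IH2 IH3 IH4
    -- entry-level transport from (mat.set s R, Y) back to (mat, y)
    have hmat1 : ∀ i, i ≠ s → (mat.set s R).getD i [] = mat.getD i [] :=
      fun i hi => getD_set_ne mat s i R [] (fun h => hi h.symm)
    have hgg1 : ∀ i j, i ≠ s → ggA (mat.set s R) i j = ggA mat i j := by
      intro i j hi; unfold ggA; rw [hmat1 i hi]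
    have hy1 : ∀ l t, t ≠ s → ggA Y l t = ggA y l t := by
      intro l t ht
      unfold ggA
      rw [hYget l]
      by_cases hl : l < m
      · rw [if_pos hl, getD_set_ne _ s t _ 0 (fun h => ht h.symm)]
      · rw [if_neg hl, hyempty l (by omega)]
    have hz1 : ∀ i, i ≠ s → zA p (mat.set s R) k i = zA p mat k i := by
      intro i hi
      unfold zA ggA
      rw [hmat1 i hi, hmat1 k (by omega)]
    rw [List.range'_succ, List.foldl_cons, hst1]
    simp only
    refine ⟨IH1, ?_, ?_, ?_⟩
    · intro i hi
      rw [IH2 i (by omega), hmat1 i (by omega)]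
    · intro l t ht
      rw [IH3 l t (by omega), hy1 l t (by omega)]
    · intro i hi1 hi2
      by_cases his : i = s
      · subst his
        constructor
        · intro j hj
          unfold ggA
          rw [IH2 i (by omega), getD_set_self mat i R [] hsl, hR,
            fold_set_range'_getD (fun j v => PySem.Int.mod (v - z * (mat.getD k []).getD j 0) p)
              0 (n-(k+1)) (k+1) ((mat.getD i []).set k 0) j]
          have hilen : (mat.getD i []).length ≥ n := hR1 i hsn
          have hklen : k < ((mat.getD i []).set k 0).length := by
            rw [List.length_set]; omega
          by_cases hjk : j = k
          · subst hjk
            rw [if_neg (by omega), getD_set_self _ j 0 0 (by simpa using hklen), if_pos rfl]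
          · rw [getD_set_ne _ k j 0 0 (fun h => hjk h.symm)]
            by_cases hkj : k+1 ≤ j
            · rw [if_pos ⟨hkj, by omega, by rw [List.length_set]; omega⟩, if_neg hjk, if_pos hkj, hz]
            · rw [if_neg (by omega), if_neg hjk, if_neg hkj]
        · intro l hl
          rw [IH3 l i (by omega)]
          unfold ggA
          rw [hYget l, if_pos hl,
            getD_set_self _ i _ 0 (by have := hR2 l hl; omega), hz]
      · have his1 : s + 1 ≤ i := by omega
        obtain ⟨IH4a, IH4b⟩ := IH4 i his1 (by omega)
        constructor
        · intro j hj
          rw [IH4a j hj, hgg1 i j his, hgg1 k j (by omega), hz1 i his]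
        · intro l hl
          rw [IH4b l hl, hy1 l i his, hy1 l k (by omega), hz1 i his]

-- ---- B-side bridge definitions ----

-- state after processing pivots 0..k-1 of A's elimination
def stepK (p : Int) (n m : Nat) (st : List (List Int) × List (List Int)) (k : Nat) :
    List (List Int) × List (List Int) :=
  (List.range' (k+1) (n-(k+1))).foldl (bodyA p n m k) st

def stPart (p : Int) (a b : List (List Int)) (k : Nat) : List (List Int) × List (List Int) :=
  (List.range k).foldl (stepK p a.length b.length) (a, b)

-- the active augmented rows at depth k, extracted from A's state
def ExtR (n m : Nat) (st : List (List Int) × List (List Int)) (k : Nat) : List (List Int) :=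
  (List.range' k (n-k)).map (fun i =>
    (List.range' k (n-k)).map (fun j => ggA st.1 i j) ++ (List.range m).map (fun l => ggA st.2 l i))

-- the finished pivot row of original index i
def pivRow (n m : Nat) (st : List (List Int) × List (List Int)) (i : Nat) : List Int :=
  (List.range' i (n-i)).map (fun j => ggA st.1 i j) ++ (List.range m).map (fun l => ggA st.2 l i)

-- ---- more list helpers ----
lemma map_range'_cons {α} (f : Nat → α) (s c : Nat) :
    (List.range' s (c+1)).map f = f s :: (List.range' (s+1) c).map f := by
  rw [List.range'_succ]; rfl

lemma backB_length (p : Int) (m l : Nat) : ∀ rows, (backB p m l rows).length = rows.length := by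
  intro rows
  induction rows with
  | nil => rfl
  | cons piv rest ih => simp [backB, ih]

lemma zip_trunc {α β} (xs zs : List α) (ys : List β) (h : xs.length = ys.length) :
    List.zip (xs ++ zs) ys = List.zip xs ys := by
  conv_lhs => rw [show ys = ys ++ [] from by simp]
  rw [List.zip_append h]
  simp

lemma getD_append_left {α} (xs ys : List α) (t : Nat) (d : α) (h : t < xs.length) :
    (xs ++ ys).getD t d = xs.getD t d := by
  rw [List.getD_eq_getElem _ d (by simp; omega), List.getD_eq_getElem _ d h,
    List.getElem_append_left h]

lemma getD_append_right {α} (xs ys : List α) (t : Nat) (d : α) (h : xs.length ≤ t) :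
    (xs ++ ys).getD t d = ys.getD (t - xs.length) d := by
  unfold List.getD
  rw [List.getElem?_append_right h]

lemma set_take_eq {α} (x : List α) (s : Nat) (hs : s < x.length) (v : α) :
    (x.set s v).take (s+1) = x.take s ++ [v] := by
  have hlen : (x.take s).length = s := by rw [List.length_take]; omega
  apply List.ext_getElem (by simp; omega)
  intro i h1 h2
  simp only [List.getElem_take, List.getElem_set]
  by_cases his : i = s
  · subst his
    rw [if_pos rfl, List.getElem_append_right (by simp [hlen])]
    simp [hlen]
  · have hilt : i < (x.take s).length := by
      rw [hlen]
      have : i ≤ s ∧ i < x.length := by simpa using h1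
      omega
    rw [if_neg (fun hh => his hh.symm), List.getElem_append_left hilt]
    simp

lemma take_set_last {α} (x : List α) (s : Nat) (hs : s < x.length) (v : α) :
    (x.take (s+1)).set s v = x.take s ++ [v] := by
  rw [← List.take_set, set_take_eq x s hs v]

lemma set_prefix {α} (x : List α) (s : Nat) (hs : s < x.length) (v : α) (zs : List α) :
    (x.take (s+1) ++ zs).set s v = x.take s ++ v :: zs := by
  have h1 : s < (x.take (s+1)).length := by rw [List.length_take]; omega
  rw [List.set_append_left _ _ (by omega), take_set_last x s hs v]
  simp

lemma drop_map_range {α} (f : Nat → α) (n s : Nat) :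
    ((List.range n).map f).drop s = (List.range' s (n - s)).map f := by
  rw [List.range_eq_range', ← List.map_drop]
  congr 1
  apply List.ext_getElem (by simp) 
  intro i h1 h2
  simp [List.getElem_range']

lemma solveB_nil (p : Int) : solveB p [] = [] := by rw [solveB]

lemma solveB_single (p : Int) (piv : List Int) : solveB p [piv] = [piv] := by
  rw [solveB]
  simp [solveB_nil]

lemma solveB_cons (p : Int) (piv : List Int) (rest : List (List Int)) (h : ¬ rest.isEmpty) :
    solveB p (piv :: rest) = piv :: solveB p (rest.map (fun r =>
      List.zipWith (fun rj pj => PySem.Int.mod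
          (rj - PySem.Int.mod (r.headD 0 * pyPowInv (piv.headD 0) p) p * pj) p)
        (r.drop 1) (piv.drop 1))) := by
  rw [solveB]
  simp [h]

lemma stPart_succ (p : Int) (a b : List (List Int)) (k : Nat) :
    stPart p a b (k+1) = stepK p a.length b.length (stPart p a b k) k := by
  unfold stPart
  rw [List.range_succ, List.foldl_append]
  rfl

lemma SH_base (a b : List (List Int))
    (ha : ∀ r ∈ a, a.length ≤ r.length) (hb : ∀ r ∈ b, a.length ≤ r.length) :
    SH a.length b.length (a, b) := by
  refine ⟨rfl, rfl, ?_, ?_⟩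
  · intro i hi
    rw [List.getD_eq_getElem _ [] (by simpa using hi)]
    exact ha _ (List.getElem_mem _)
  · intro l hl
    rw [List.getD_eq_getElem _ [] (by simpa using hl)]
    exact hb _ (List.getElem_mem _)

lemma SH_part (p : Int) (a b : List (List Int))
    (ha : ∀ r ∈ a, a.length ≤ r.length) (hb : ∀ r ∈ b, a.length ≤ r.length) :
    ∀ k, k ≤ a.length → SH a.length b.length (stPart p a b k) := by
  intro k
  induction k with
  | zero => intro _; exact SH_base a b ha hb
  | succ k ih =>
    intro hk
    rw [stPart_succ]
    exact (ifold p a.length b.length k (a.length-(k+1)) (k+1) _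
      (ih (by omega)) (by omega) (by omega)).1

lemma stab (p : Int) (a b : List (List Int))
    (ha : ∀ r ∈ a, a.length ≤ r.length) (hb : ∀ r ∈ b, a.length ≤ r.length) :
    ∀ t, t ≤ a.length → ∀ k, k ≤ t →
      (∀ i, i ≤ k → (stPart p a b t).1.getD i [] = (stPart p a b k).1.getD i []) ∧
      (∀ l i, i ≤ k → ggA (stPart p a b t).2 l i = ggA (stPart p a b k).2 l i) := by
  intro t
  induction t with
  | zero =>
    intro _ k hk
    have : k = 0 := by omega
    subst this
    exact ⟨fun i _ => rfl, fun l i _ => rfl⟩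
  | succ t ih =>
    intro ht k hk
    by_cases hkt : k = t + 1
    · subst hkt
      exact ⟨fun i _ => rfl, fun l i _ => rfl⟩
    · have hk' : k ≤ t := by omega
      have IF := ifold p a.length b.length t (a.length-(t+1)) (t+1) (stPart p a b t)
        (SH_part p a b ha hb t (by omega)) (by omega) (by omega)
      have hstep : stPart p a b (t+1) = stepK p a.length b.length (stPart p a b t) t :=
        stPart_succ p a b t
      constructor
      · intro i hi
        rw [hstep]
        unfold stepK
        rw [IF.2.1 i (by omega)]
        exact (ih (by omega) k hk').1 i hi
      · intro l i hi
        rw [hstep]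
        unfold stepK
        rw [IF.2.2.1 l i (by omega)]
        exact (ih (by omega) k hk').2 l i hi

lemma headD_eq_getD {α} (l : List α) (d : α) : l.headD d = l.getD 0 d := by
  cases l <;> rfl

lemma ext_getD {α} (d : α) (l1 l2 : List α) (h : l1.length = l2.length)
    (he : ∀ u, u < l1.length → l1.getD u d = l2.getD u d) : l1 = l2 := by
  apply List.ext_getElem h
  intro i h1 h2
  have := he i h1
  rwa [List.getD_eq_getElem _ d h1, List.getD_eq_getElem _ d h2] at this

lemma getD_map_range' {α} (f : Nat → α) (s c u : Nat) (d : α) :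
    ((List.range' s c).map f).getD u d = if u < c then f (s + u) else d := by
  by_cases h : u < c
  · rw [List.getD_eq_getElem _ d (by simp [h]), if_pos h]
    simp [List.getElem_range']
  · rw [if_neg h, List.getD_eq_default _ d (by simp; omega)]

lemma augRow_getD (st : List (List Int) × List (List Int)) (kk cc m i u : Nat) :
    ((List.range' kk cc).map (fun j => ggA st.1 i j)
        ++ (List.range m).map (fun l => ggA st.2 l i)).getD u 0
      = if u < cc then ggA st.1 i (kk+u)
        else if u < cc + m then ggA st.2 (u-cc) i else 0 := by
  by_cases h : u < cc
  · rw [getD_append_left _ _ u 0 (by simp; omega), getD_map_range', if_pos h, if_pos h]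
  · rw [getD_append_right _ _ u 0 (by simp; omega), if_neg h]
    rw [show ((List.range' kk cc).map (fun j => ggA st.1 i j)).length = cc from by simp]
    rw [getD_map_range (fun l => ggA st.2 l i) m (u - cc) 0]
    by_cases h2 : u < cc + m
    · rw [if_pos (by omega), if_pos h2]
    · rw [if_neg (by omega), if_neg h2]

lemma getD_zipWith' {α β γ} (fn : α → β → γ) (A : List α) (B : List β) (u : Nat)
    (h1 : u < A.length) (h2 : u < B.length) (d : γ) (da : α) (db : β) :
    (List.zipWith fn A B).getD u d = fn (A.getD u da) (B.getD u db) := by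
  rw [List.getD_eq_getElem _ _ (by simp; omega), List.getElem_zipWith,
    List.getD_eq_getElem _ da h1, List.getD_eq_getElem _ db h2]

lemma getD_drop' {α} (A : List α) (u : Nat) (d : α) :
    (A.drop 1).getD u d = A.getD (1+u) d := by
  unfold List.getD
  rw [List.getElem?_drop]

lemma solve_ext (p : Int) (a b : List (List Int))
    (ha : ∀ r ∈ a, a.length ≤ r.length) (hb : ∀ r ∈ b, a.length ≤ r.length) :
    ∀ c k, k + (c + 1) = a.length →
      solveB p (ExtR a.length b.length (stPart p a b k) k) =
        (List.range' k (a.length - k)).map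
          (pivRow a.length b.length (stPart p a b (a.length - 1))) := by
  intro c
  induction c with
  | zero =>
    intro k hk
    have hk' : k = a.length - 1 := by omega
    subst hk'
    have h1 : a.length - (a.length - 1) = 1 := by omega
    unfold ExtR pivRow
    simp only [h1, List.range'_one, List.map_cons, List.map_nil, solveB_single]
  | succ c ih =>
    intro k hk
    have hnk : a.length - k = c + 1 + 1 := by omega
    have hnk1 : a.length - (k+1) = c + 1 := by omega
    obtain ⟨hL1, hL2, hR1, hR2⟩ := SH_part p a b ha hb k (by omega)
    have IF := ifold p a.length b.length k (a.length-(k+1)) (k+1) (stPart p a b k)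
      (SH_part p a b ha hb k (by omega)) (by omega) (by omega)
    unfold ExtR
    simp only [hnk, hnk1]
    rw [map_range'_cons, solveB_cons _ _ _ (by simp)]
    have hstep : ((List.range' (k+1) (c+1)).map (fun i =>
          (List.range' k (c+1+1)).map (fun j => ggA (stPart p a b k).1 i j)
            ++ (List.range b.length).map (fun l => ggA (stPart p a b k).2 l i))).map
          (fun r => List.zipWith (fun rj pj => PySem.Int.mod
              (rj - PySem.Int.mod (r.headD 0 * pyPowInv
                (((List.range' k (c+1+1)).map (fun j => ggA (stPart p a b k).1 k j)
                  ++ (List.range b.length).map (fun l => ggA (stPart p a b k).2 l k)).headD 0) p) p * pj) p)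
            (r.drop 1)
            (((List.range' k (c+1+1)).map (fun j => ggA (stPart p a b k).1 k j)
              ++ (List.range b.length).map (fun l => ggA (stPart p a b k).2 l k)).drop 1))
        = ExtR a.length b.length (stPart p a b (k+1)) (k+1) := by
      unfold ExtR
      simp only [hnk1]
      rw [List.map_map]
      apply List.map_congr_left
      intro i0 hi0
      obtain ⟨tt, htt, rfl⟩ := List.mem_range'.mp hi0
      simp only [one_mul, Function.comp]
      obtain ⟨IFa, IFb⟩ := IF.2.2.2 (k+1+tt) (by omega) (by omega)
      rw [stPart_succ]
      unfold stepK
      apply ext_getD 0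
      · simp
      · intro u hu
        have hu' : u < c + 1 + b.length := by
          simpa using hu
        rw [getD_zipWith' _ _ _ u (by simp; omega) (by simp; omega) 0 0 0,
          getD_drop', getD_drop', headD_eq_getD, headD_eq_getD,
          augRow_getD (stPart p a b k) k (c+1+1) b.length (k+1+tt) (1+u),
          augRow_getD (stPart p a b k) k (c+1+1) b.length k (1+u),
          augRow_getD (stPart p a b k) k (c+1+1) b.length (k+1+tt) 0,
          augRow_getD (stPart p a b k) k (c+1+1) b.length k 0,
          augRow_getD _ (k+1) (c+1) b.length (k+1+tt) u,
          if_pos (show (0:Nat) < c+1+1 from by omega),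
          if_pos (show (0:Nat) < c+1+1 from by omega)]
        by_cases hcu : u < c + 1
        · rw [if_pos (show 1+u < c+1+1 from by omega),
            if_pos (show 1+u < c+1+1 from by omega), if_pos hcu,
            IFa (k+1+u) (by omega), if_neg (by omega), if_pos (by omega)]
          simp only [zA, Nat.add_zero, ← Nat.add_assoc]
        · rw [if_neg (show ¬ (1+u < c+1+1) from by omega),
            if_neg (show ¬ (1+u < c+1+1) from by omega),
            if_pos (show 1+u < c+1+1+b.length from by omega),
            if_pos (show 1+u < c+1+1+b.length from by omega),
            if_neg hcu, if_pos (show u < c+1+b.length from by omega),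
            IFb (u - (c+1)) (by omega)]
          simp only [zA, Nat.add_zero]
          rw [show 1+u - (c+1+1) = u - (c+1) from by omega]
    rw [hstep, ih (k+1) (by omega)]
    conv_rhs => rw [map_range'_cons]
    rw [hnk1]
    congr 1
    have hrowk := (stab p a b ha hb (a.length - 1) (by omega) k (by omega)).1 k le_rfl
    have hyk := (stab p a b ha hb (a.length - 1) (by omega) k (by omega)).2
    unfold pivRow
    apply ext_getD 0
    · simp [hnk]
    · intro u hu
      have hu' : u < c+1+1+b.length := by
        simp at hu
        omega
      rw [augRow_getD (stPart p a b k) k (c+1+1) b.length k u, hnk,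
        augRow_getD (stPart p a b (a.length - 1)) k (c+1+1) b.length k u]
      by_cases hcu : u < c+1+1
      · rw [if_pos hcu, if_pos hcu]
        unfold ggA
        rw [hrowk]
      · rw [if_neg hcu, if_neg hcu, if_pos (by omega), if_pos (by omega)]
        exact (hyk (u - (c+1+1)) k le_rfl).symm

-- the outer per-right-hand-side loop of A's back substitution, as a map
lemma outer_fold {α} (h : Nat → Nat → List α → List α) (M : List Nat) :
    ∀ (c s : Nat) (x : List (List α)), s + c = x.length →
      (List.range' s c).foldl (fun x l => M.foldl (fun x i => x.set l (h l i (x.getD l []))) x) x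
        = x.take s ++ (List.range' s c).map
            (fun l => M.foldl (fun r i => h l i r) (x.getD l [])) := by
  have hfun : (fun (x : List (List α)) l =>
        M.foldl (fun x i => x.set l (h l i (x.getD l []))) x)
      = (fun x l => x.set l (M.foldl (fun r i => h l i r) (x.getD l []))) :=
    funext fun x => funext fun l => foldl_set_at M l (h l) x
  intro c s x hx
  rw [hfun]
  exact fold_set_map (fun l => M.foldl (fun r i => h l i r)) c s x hx

-- the downward back-substitution loop computes backB, back to front
lemma back_main (p : Int) (mat y : List (List Int)) (n m l : Nat) (hl : l < m) :
    ∀ c, c ≤ n → ∀ (r : List Int), r.length = n →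
      ((List.range' (n-c) c).reverse).foldl
        (fun r i => r.set i (PySem.Int.mod
          (((y.getD l []).getD i 0 - (List.range' (i+1) (n-(i+1))).foldl
            (fun s' j => PySem.Int.mod (s' + (mat.getD i []).getD j 0 * r.getD j 0) p) 0)
          * pyPowInv ((mat.getD i []).getD i 0) p) p)) r
      = r.take (n-c) ++ backB p m l (((List.range n).map (pivRow n m (mat, y))).drop (n-c)) := by
  intro c
  induction c with
  | zero =>
    intro _ r hr
    simp only [Nat.sub_zero, List.range'_zero, List.reverse_nil, List.foldl_nil]
    rw [List.drop_eq_nil_of_le (by simp), List.take_of_length_le (by omega)]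
    simp [backB]
  | succ c ihc =>
    intro hc r hr
    have hsn : n - (c+1) < n := by omega
    have hs1 : n - c = (n - (c+1)) + 1 := by omega
    rw [show List.range' (n-(c+1)) (c+1) = (n-(c+1)) :: List.range' (n-c) c from by
        rw [List.range'_succ, ← hs1],
      List.reverse_cons, List.foldl_append, ihc (by omega) r hr]
    simp only [List.foldl_cons, List.foldl_nil]
    have hdrop1 : ((List.range n).map (pivRow n m (mat, y))).drop (n-c)
        = (List.range' (n-c) c).map (pivRow n m (mat, y)) := by
      rw [drop_map_range, show n - (n-c) = c from by omega]
    have hdrop2 : ((List.range n).map (pivRow n m (mat, y))).drop (n-(c+1))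
        = (List.range' (n-(c+1)) (c+1)).map (pivRow n m (mat, y)) := by
      rw [drop_map_range, show n - (n-(c+1)) = c+1 from by omega]
    rw [hdrop1, hdrop2, map_range'_cons, ← hs1]
    have hns : n - (n-(c+1)) = c + 1 := by omega
    have htlen : (backB p m l ((List.range' (n-c) c).map (pivRow n m (mat, y)))).length = c := by
      rw [backB_length]; simp
    have hcons : backB p m l (pivRow n m (mat, y) (n-(c+1))
          :: (List.range' (n-c) c).map (pivRow n m (mat, y)))
        = PySem.Int.mod (((pivRow n m (mat, y) (n-(c+1))).getD
              ((pivRow n m (mat, y) (n-(c+1))).length - m + l) 0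
            - (((pivRow n m (mat, y) (n-(c+1))).drop 1).zip
                (backB p m l ((List.range' (n-c) c).map (pivRow n m (mat, y))))).foldl
                  (fun s cx => PySem.Int.mod (s + cx.1 * cx.2) p) 0)
          * pyPowInv ((pivRow n m (mat, y) (n-(c+1))).headD 0) p) p
          :: backB p m l ((List.range' (n-c) c).map (pivRow n m (mat, y))) := rfl
    rw [hcons]
    have hset := set_prefix r (n-(c+1)) (by omega)
      (PySem.Int.mod (((y.getD l []).getD (n-(c+1)) 0
          - (List.range' ((n-(c+1))+1) (n-((n-(c+1))+1))).foldl
            (fun s' j => PySem.Int.mod (s' + (mat.getD (n-(c+1)) []).getD j 0 *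
              (r.take (n-c) ++ backB p m l ((List.range' (n-c) c).map (pivRow n m (mat, y)))).getD j 0) p) 0)
        * pyPowInv ((mat.getD (n-(c+1)) []).getD (n-(c+1)) 0) p) p)
      (backB p m l ((List.range' (n-c) c).map (pivRow n m (mat, y))))
    rw [← hs1] at hset
    rw [hset]
    congr 1
    congr 1
    have e1 : (pivRow n m (mat, y) (n-(c+1))).getD
          ((pivRow n m (mat, y) (n-(c+1))).length - m + l) 0
        = (y.getD l []).getD (n-(c+1)) 0 := by
      have hlen1 : (pivRow n m (mat, y) (n-(c+1))).length = (c+1) + m := by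
        simp [pivRow, hns]
      rw [hlen1, show (c+1)+m-m+l = (c+1)+l from by omega]
      unfold pivRow
      rw [hns, augRow_getD (mat, y) (n-(c+1)) (c+1) m (n-(c+1)) ((c+1)+l),
        if_neg (by omega), if_pos (by omega), show c+1+l-(c+1) = l from by omega]
      rfl
    have e2 : (pivRow n m (mat, y) (n-(c+1))).headD 0
        = (mat.getD (n-(c+1)) []).getD (n-(c+1)) 0 := by
      unfold pivRow
      rw [headD_eq_getD, hns, augRow_getD (mat, y) (n-(c+1)) (c+1) m (n-(c+1)) 0,
        if_pos (by omega)]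
      simp [ggA]
    have e3 : List.foldl (fun s cx => PySem.Int.mod (s + cx.1 * cx.2) p) 0
          ((List.drop 1 (pivRow n m (mat, y) (n-(c+1)))).zip
            (backB p m l (List.map (pivRow n m (mat, y)) (List.range' (n-c) c))))
        = List.foldl (fun s' j => PySem.Int.mod
            (s' + (mat.getD (n-(c+1)) []).getD j 0 *
              (List.take (n-c) r ++ backB p m l
                (List.map (pivRow n m (mat, y)) (List.range' (n-c) c))).getD j 0) p)
            0 (List.range' (n-c) (n-(n-c))) := by
      have h3 : List.drop 1 (pivRow n m (mat, y) (n-(c+1)))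
          = (List.range' (n-c) c).map (fun j => ggA (mat, y).1 (n-(c+1)) j)
            ++ (List.range m).map (fun lx => ggA (mat, y).2 lx (n-(c+1))) := by
        unfold pivRow
        rw [hns, map_range'_cons, ← hs1]
        rfl
      have hzip : (List.drop 1 (pivRow n m (mat, y) (n-(c+1)))).zip
            (backB p m l (List.map (pivRow n m (mat, y)) (List.range' (n-c) c)))
          = (List.range' (n-c) c).map (fun j => ((mat.getD (n-(c+1)) []).getD j 0,
              (List.take (n-c) r ++ backB p m l
                (List.map (pivRow n m (mat, y)) (List.range' (n-c) c))).getD j 0)) := by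
        rw [h3, zip_trunc _ _ _ (by simp [htlen])]
        rw [show ∀ (A B : List Int), A.zip B = List.zipWith Prod.mk A B from fun _ _ => rfl]
        apply ext_getD ((0:Int),(0:Int))
        · simp [htlen]
        · intro u hu
          have hu' : u < c := by
            simpa [htlen] using hu
          rw [getD_zipWith' Prod.mk _ _ u (by simpa using hu') (by rw [htlen]; exact hu')
              ((0:Int),(0:Int)) 0 0,
            getD_map_range' _ _ c u 0, if_pos hu',
            getD_map_range' _ _ c u ((0:Int),(0:Int)), if_pos hu',
            getD_append_right _ _ _ _ (by simp),
            show (n-c)+u - (List.take (n-c) r).length = u from by simp; omega]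
          rfl
      rw [hzip, List.foldl_map, show n - (n-c) = c from by omega]
    rw [e1, e2, e3]

lemma take_eq_map_range (r : List Int) (n : Nat) (h : n ≤ r.length) :
    r.take n = (List.range n).map (fun j => r.getD j 0) := by
  apply List.ext_getElem (by simp; omega)
  intro i h1 h2
  have hi : i < r.length := by
    simp at h1
    omega
  simp only [List.getElem_take, List.getElem_map, List.getElem_range]
  exact (List.getD_eq_getElem r 0 hi).symm

theorem mod_gauss_equiv : ∀ (a : List (List Int)) (b : List (List Int)) (p : Int),
    Pre_mod_gauss a b p → mod_gauss a b p = mod_gauss_alt a b p := by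
  intro a b p hpre
  obtain ⟨ha, hb, -, -⟩ := hpre
  obtain ⟨hF1, hF2, hF3, hF4⟩ := SH_part p a b ha hb (a.length - 1) (by omega)
  -- A's program, with its phase-1 state written as stPart (definitional)
  have hA : mod_gauss a b p
      = (List.range b.length).foldl
          (fun x l => ((List.range a.length).reverse).foldl
            (fun x i =>
              let s := (List.range' (i+1) (a.length-(i+1))).foldl
                (fun s j => PySem.Int.mod
                  (s + ggA (stPart p a b (a.length-1)).1 i j * ggA x l j) p) 0
              x.set l ((x.getD l []).set i
                (PySem.Int.mod ((ggA (stPart p a b (a.length-1)).2 l i - s)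
                  * pyPowInv (ggA (stPart p a b (a.length-1)).1 i i) p) p))) x)
          ((List.range b.length).map (fun _ => (List.range a.length).map (fun _ => (0:Int)))) := rfl
  -- B's program (definitional)
  have hB : mod_gauss_alt a b p
      = (List.range b.length).map (fun l => backB p b.length l (solveB p
          ((List.range a.length).map (fun i => (a.getD i []).take a.length
            ++ (List.range b.length).map (fun l => ggA b l i))))) := rfl
  rw [hA, hB]
  -- B's initial rows are the depth-0 extraction of A's state
  have h0 : (List.range a.length).map (fun i => (a.getD i []).take a.length
        ++ (List.range b.length).map (fun l => ggA b l i))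
      = ExtR a.length b.length (stPart p a b 0) 0 := by
    unfold ExtR
    simp only [Nat.sub_zero, ← List.range_eq_range']
    apply List.map_congr_left
    intro i hi
    have hi' : i < a.length := by simpa using hi
    have hlen : a.length ≤ (a.getD i []).length := by
      rw [List.getD_eq_getElem _ [] hi']
      exact ha _ (List.getElem_mem _)
    refine congrArg₂ (· ++ ·) ?_ rfl
    rw [take_eq_map_range _ _ hlen]
    rfl
  have hpiv : solveB p ((List.range a.length).map (fun i => (a.getD i []).take a.length
        ++ (List.range b.length).map (fun l => ggA b l i)))
      = (List.range a.length).map (pivRow a.length b.length (stPart p a b (a.length - 1))) := by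
    by_cases hn : a.length = 0
    · simp [h0, ExtR, hn, solveB_nil]
    · rw [h0, solve_ext p a b ha hb (a.length - 1) 0 (by omega)]
      simp [← List.range_eq_range']
  rw [hpiv]
  -- A's back substitution, one right-hand side at a time
  simp only [ggA]
  rw [List.range_eq_range' (n := b.length),
    outer_fold (fun l i r => r.set i (PySem.Int.mod
        ((((stPart p a b (a.length-1)).2.getD l []).getD i 0
          - (List.range' (i+1) (a.length-(i+1))).foldl
              (fun s j => PySem.Int.mod
                (s + (((stPart p a b (a.length-1)).1.getD i []).getD j 0) * r.getD j 0) p) 0)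
        * pyPowInv (((stPart p a b (a.length-1)).1.getD i []).getD i 0) p) p))
      ((List.range a.length).reverse) b.length 0 _ (by simp)]
  simp only [List.take_zero, List.nil_append, ← List.range_eq_range']
  apply List.map_congr_left
  intro l hl
  have hl' : l < b.length := by simpa using hl
  have hx0 : ((List.range b.length).map
        (fun _ => (List.range a.length).map (fun _ => (0:Int)))).getD l []
      = (List.range a.length).map (fun _ => (0:Int)) := by
    rw [getD_map_range, if_pos hl']
  rw [hx0]
  have hbm := back_main p (stPart p a b (a.length-1)).1 (stPart p a b (a.length-1)).2
    a.length b.length l hl' a.length le_rfl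
    ((List.range a.length).map (fun _ => (0:Int))) (by simp)
  rw [show a.length - a.length = 0 from by omega] at hbm
  simp only [← List.range_eq_range', List.take_zero, List.nil_append, List.drop_zero] at hbm
  rw [hbm]

-- ===== VERDICT (by name: the statement is the Claim_ definition above) =====
theorem mod_gauss_spec : Claim_equal_mod_gauss := by
  intro a b p _ hpre
  exact mod_gauss_equiv a b p hpre
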